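-- pv_equiv track=rewrite | github.com/KacperPietryka/Algorytmy-i-struktury-danych | lista1.py | example4
-- ===== SOURCE A (Python) =====
-- def example4(A, B): # assume that A and B have equal length
--     """Return the number of elements in B equal to the sum of prex
--     sums in A."""
--     n = len(A)
--     count = 0
--     for i in range(n):
--         total = 0
--         for j in range(n):
--             for k in range(1+j):
--                 total += A[k]
--             if B[i] == total:
--                 count += 1
--     return count
-- ===== SOURCE B (Python) =====
-- def example4(A, B): # assume that A and B have equal length
--     """Return the number of elements in B equal to the sum of prex
--     sums in A."""
--     totals = []
--     pref = 0
--     cum = 0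
--     for a in A:
--         pref += a
--         cum += pref
--         totals.append(cum)
--     cnt = {}
--     for t in totals:
--         cnt[t] = cnt.get(t, 0) + 1
--     return sum(cnt.get(B[i], 0) for i in range(len(A)))
-- ===== Notes on version B (the rewrite author's own statement) =====
-- stated objective: faster
-- what changed: Replaces A's triple nested loop (which recomputes every prefix sum from scratch for every i) by a single pass that builds the cumulative-prefix-sum list with two running accumulators, counts its values in a dict once, and answers each B[i] by one dict lookup.
import Mathlib
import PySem

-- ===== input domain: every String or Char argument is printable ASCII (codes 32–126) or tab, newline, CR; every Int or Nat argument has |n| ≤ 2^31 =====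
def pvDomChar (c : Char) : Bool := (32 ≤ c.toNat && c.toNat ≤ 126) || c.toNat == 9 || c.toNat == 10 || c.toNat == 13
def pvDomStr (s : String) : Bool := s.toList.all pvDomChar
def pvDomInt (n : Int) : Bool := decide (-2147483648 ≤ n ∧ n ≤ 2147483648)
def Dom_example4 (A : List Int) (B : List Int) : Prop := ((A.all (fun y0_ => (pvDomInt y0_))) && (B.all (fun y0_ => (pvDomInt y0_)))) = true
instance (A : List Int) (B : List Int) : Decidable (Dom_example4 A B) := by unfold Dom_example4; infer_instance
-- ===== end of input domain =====

-- B replaces A's cubic triple loop by one pass building the cumulative-prefix-sum list,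
-- a counter over it, and a lookup per element of B (objective: faster, asymptotic).

-- ===== PORT A =====
def example4 (A : List Int) (B : List Int) : Int :=
  let n : Int := A.length
  (PySem.List.pyRange 0 n 1).foldl (fun count i =>
    ((PySem.List.pyRange 0 n 1).foldl (fun (tc : Int × Int) j =>
        let total := (PySem.List.pyRange 0 (1 + j) 1).foldl
          (fun t k => t + PySem.List.pyGetD A k 0) tc.1
        if PySem.List.pyGetD B i 0 == total then (total, tc.2 + 1) else (total, tc.2))
      ((0 : Int), count)).2) 0

-- ===== PORT B =====
def example4_alt (A : List Int) (B : List Int) : Int :=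
  let st := A.foldl (fun (s : Int × Int × List Int) a =>
      let pref := s.1 + a
      let cum := s.2.1 + pref
      (pref, cum, s.2.2 ++ [cum])) ((0 : Int), (0 : Int), ([] : List Int))
  let totals := st.2.2
  let cnt := totals.foldl (fun (d : PySem.Dict Int Int) t => d.insert t (d.getD t 0 + 1))
    PySem.Dict.empty
  (PySem.List.pyRange 0 (A.length : Int) 1).foldl
    (fun s i => s + cnt.getD (PySem.List.pyGetD B i 0) 0) 0

-- ===== PRECONDITION & SPEC =====
-- A evaluates B[i] for every i < len(A): shorter B raises IndexError in Python.
def Pre_example4 (A : List Int) (B : List Int) : Prop := A.length ≤ B.length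
instance (A : List Int) (B : List Int) : Decidable (Pre_example4 A B) := by unfold Pre_example4; infer_instance
def pvWitness_example4 : List Int × List Int := ([1, 2], [3, 4])

def Spec_example4 (A : List Int) (B : List Int) (out : Int) : Prop := out = example4_alt A B
instance (A : List Int) (B : List Int) (out : Int) : Decidable (Spec_example4 A B out) := by unfold Spec_example4; infer_instance

-- ===== CLAIM (what is proved, stated in full; the proofs are below) =====
def Claim_equal_example4 : Prop := ∀ (A : List Int) (B : List Int), Dom_example4 A B → Pre_example4 A B → Spec_example4 A B (example4 A B)

-- ===== LEMMAS AND PROOFS =====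

-- prefix sum of the first m elements of A
def prefA (A : List Int) (m : Nat) : Int := (A.take m).sum
-- cumulative sum of the first m prefix sums, with the running prefix offset by p
def cumOff (A : List Int) (p : Int) (m : Nat) : Int :=
  ((List.range m).map (fun t => p + prefA A (t + 1))).sum

lemma prefA_cons (a : Int) (r : List Int) (t : Nat) :
    prefA (a :: r) (t + 1) = a + prefA r t := by
  simp [prefA]

lemma cumOff_succ (A : List Int) (p : Int) (m : Nat) :
    cumOff A p (m + 1) = cumOff A p m + (p + prefA A (m + 1)) := by
  simp [cumOff, List.range_succ]

lemma cumOff_cons (a : Int) (r : List Int) (p : Int) (m : Nat) :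
    cumOff (a :: r) p (m + 1) = (p + a) + cumOff r (p + a) m := by
  induction m with
  | zero => simp [cumOff, prefA]
  | succ m ih =>
      rw [cumOff_succ, ih, cumOff_succ, prefA_cons]
      ring

lemma totals_eq (A : List Int) : ∀ (p c : Int) (acc : List Int),
    (A.foldl (fun (s : Int × Int × List Int) a =>
        (s.1 + a, s.2.1 + (s.1 + a), s.2.2 ++ [s.2.1 + (s.1 + a)])) (p, c, acc)).2.2
      = acc ++ (List.range A.length).map (fun j => c + cumOff A p (j + 1)) := by
  induction A with
  | nil => intro p c acc; simp
  | cons a r ih =>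
      intro p c acc
      simp only [List.foldl_cons]
      rw [ih (p + a) (c + (p + a)) (acc ++ [c + (p + a)])]
      rw [List.length_cons, List.range_succ_eq_map]
      simp only [List.map_cons, List.map_map]
      have h0 : c + cumOff (a :: r) p (0 + 1) = c + (p + a) := by
        simp [cumOff, prefA]
      have hf : ∀ j : Nat, c + (p + a) + cumOff r (p + a) (j + 1)
          = c + cumOff (a :: r) p (j + 1 + 1) := by
        intro j; rw [cumOff_cons]; ring
      simp only [Function.comp_def, h0]
      rw [List.append_assoc]
      congr 1
      simp only [List.singleton_append]
      congr 1
      apply List.map_congr_left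
      intro j _
      exact hf j

-- the innermost k-loop adds the (jn+1)-st prefix sum of A
lemma inner_k (A : List Int) (t0 : Int) (jn : Nat) (hj : jn < A.length) :
    (PySem.List.pyRange 0 (1 + (jn : Int)) 1).foldl
        (fun t k => t + PySem.List.pyGetD A k 0) t0 = t0 + prefA A (jn + 1) := by
  induction jn generalizing t0 with
  | zero =>
      have h1 : (1 : Int) + (0 : Nat) = 0 + 1 := by norm_num
      rw [h1, PySem.List.pyRange_one_singleton]
      have h0 : (0 : Nat) < A.length := hj
      simp [prefA, List.take_one]
      cases A with
      | nil => simp at hj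
      | cons a r => simp
  | succ m ih =>
      have hm : m < A.length := Nat.lt_of_succ_lt hj
      have h1 : (1 : Int) + ((m + 1 : Nat) : Int) = (1 + (m : Int)) + 1 := by push_cast; ring
      have h2 : (0 : Int) ≤ 1 + (m : Int) := by positivity
      rw [h1, PySem.List.pyRange_one_succ_right h2, List.foldl_append, ih t0 hm]
      simp only [List.foldl_cons, List.foldl_nil]
      have h3 : (1 : Int) + (m : Int) = ((m + 1 : Nat) : Int) := by push_cast; ring
      rw [h3, PySem.List.pyGetD_natCast]
      have h4 : prefA A (m + 1 + 1) = prefA A (m + 1) + A.getD (m + 1) 0 := by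
        simp [prefA, List.take_add_one, List.getElem?_eq_getElem hj]
        ring
      rw [h4]
      ring

-- the j-loop of A, started at total 0 and count c, counts matches of b among the cumulative sums
lemma j_loop (A : List Int) (b c : Int) (m : Nat) (hm : m ≤ A.length) :
    (PySem.List.pyRange 0 (m : Int) 1).foldl (fun (tc : Int × Int) j =>
        let total := (PySem.List.pyRange 0 (1 + j) 1).foldl
          (fun t k => t + PySem.List.pyGetD A k 0) tc.1
        if b == total then (total, tc.2 + 1) else (total, tc.2)) ((0 : Int), c)
      = (cumOff A 0 m,
         c + (((List.range m).countP (fun j => b == cumOff A 0 (j + 1)) : Nat) : Int)) := by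
  induction m with
  | zero => simp [PySem.List.pyRange, cumOff]
  | succ m ih =>
      have hm' : m ≤ A.length := Nat.le_of_succ_le hm
      have h1 : ((m + 1 : Nat) : Int) = (m : Int) + 1 := by push_cast; ring
      have h2 : (0 : Int) ≤ (m : Int) := by positivity
      rw [h1, PySem.List.pyRange_one_succ_right h2, List.foldl_append, ih hm']
      simp only [List.foldl_cons, List.foldl_nil]
      have hk : (PySem.List.pyRange 0 (1 + (m : Int)) 1).foldl
          (fun t k => t + PySem.List.pyGetD A k 0) (cumOff A 0 m)
          = cumOff A 0 m + prefA A (m + 1) := inner_k A _ m hm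
      have hc : cumOff A 0 m + prefA A (m + 1) = cumOff A 0 (m + 1) := by
        rw [cumOff_succ]; ring
      rw [List.range_succ, List.countP_append]
      simp only [hk, hc, List.countP_singleton]
      by_cases hb : (b == cumOff A 0 (m + 1)) = true
      · simp only [hb, if_true]
        refine Prod.ext rfl ?_
        push_cast
        ring
      · simp only [Bool.not_eq_true] at hb
        simp [hb]

lemma count_map_range (f : Nat → Int) (m : Nat) (b : Int) :
    ((List.range m).map f).count b = (List.range m).countP (fun j => b == f j) := by
  rw [List.count_eq_countP, List.countP_map]
  apply List.countP_congr
  intro j _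
  simp only [Function.comp_apply]
  rw [(Bool.beq_comm : (f j == b) = (b == f j))]

-- ===== VERDICT (by name: the statement is the Claim_ definition above) =====
theorem example4_spec : Claim_equal_example4 := by
  intro A B _ _
  unfold Spec_example4 example4 example4_alt
  simp only []
  -- rewrite B's side
  rw [totals_eq A 0 0 []]
  simp only [List.nil_append]
  -- the counter dict looks up the count in the totals list
  have hcnt : ∀ b : Int,
      (((List.range A.length).map (fun j => (0 : Int) + cumOff A 0 (j + 1))).foldl
        (fun (d : PySem.Dict Int Int) t => d.insert t (d.getD t 0 + 1))
        PySem.Dict.empty).getD b 0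
      = (((List.range A.length).map (fun j => (0 : Int) + cumOff A 0 (j + 1))).count b) := by
    intro b
    rw [PySem.Dict.getD_foldl_insert_add_one]
    simp [PySem.Dict.getD_empty]
  -- rewrite A's outer loop body via j_loop
  have hstep : (fun (count : Int) (i : Int) =>
      ((PySem.List.pyRange 0 (A.length : Int) 1).foldl (fun (tc : Int × Int) j =>
        let total := (PySem.List.pyRange 0 (1 + j) 1).foldl
          (fun t k => t + PySem.List.pyGetD A k 0) tc.1
        if PySem.List.pyGetD B i 0 == total then (total, tc.2 + 1) else (total, tc.2))
        ((0 : Int), count)).2)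
      = (fun (count : Int) (i : Int) =>
          count + (((List.range A.length).countP
            (fun j => PySem.List.pyGetD B i 0 == cumOff A 0 (j + 1)) : Nat) : Int)) := by
    funext count i
    rw [j_loop A (PySem.List.pyGetD B i 0) count A.length (le_refl _)]
  rw [hstep]
  rw [PySem.List.foldl_add, PySem.List.foldl_add]
  congr 1
  apply congrArg List.sum
  apply List.map_congr_left
  intro i _
  rw [hcnt]
  rw [count_map_range]
  apply congrArg
  apply List.countP_congr
  intro j _
  simp
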